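-- pv_equiv track=rewrite | github.com/rightthumb/rightthumb-widgets-v0 | widgets/python/library/switches/SwitchManager.py | ws_sep
-- ===== SOURCE A (Python) =====
-- def ws_sep(string):
-- 	"""
-- 	Split leading whitespace from remainder. Stable for empty/whitespace-only inputs.
-- 	Returns: (prefix_ws, rest)
-- 	"""
-- 	a=''
-- 	b=''
-- 	done=False
-- 	for ch in string:
-- 		if done:
-- 			b+=ch
-- 		elif ch in ' \t':
-- 			a+=ch
-- 		else:
-- 			b+=ch
-- 			done=True
-- 	return a,b
-- ===== SOURCE B (Python) =====
-- def ws_sep(string):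
-- 	"""
-- 	Split leading whitespace from remainder. Stable for empty/whitespace-only inputs.
-- 	Returns: (prefix_ws, rest)
-- 	"""
-- 	rest = string.lstrip(' \t')
-- 	return string[:len(string) - len(rest)], rest
-- ===== Notes on version B (the rewrite author's own statement) =====
-- stated objective: faster
-- what changed: Replaces the per-character loop with a done flag and two incrementally concatenated string accumulators by one lstrip of the space/tab prefix plus a single prefix slice.
import Mathlib
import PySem

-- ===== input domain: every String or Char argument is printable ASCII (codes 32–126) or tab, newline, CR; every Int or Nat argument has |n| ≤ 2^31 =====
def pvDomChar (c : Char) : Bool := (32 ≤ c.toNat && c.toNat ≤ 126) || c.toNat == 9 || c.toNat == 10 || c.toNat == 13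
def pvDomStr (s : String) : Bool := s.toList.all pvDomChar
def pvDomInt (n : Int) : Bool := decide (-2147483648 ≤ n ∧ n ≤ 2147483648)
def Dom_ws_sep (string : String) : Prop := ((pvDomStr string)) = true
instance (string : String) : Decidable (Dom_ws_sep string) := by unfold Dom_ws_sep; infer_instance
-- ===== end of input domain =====

-- B replaces A's per-character loop with a done flag by lstrip(' \t') plus one prefix slice (idiomatic).


-- ===== PORT A =====
-- one loop step: state (a, b, done), exactly A's branch order
def wsSepStep (st : List Char × List Char × Bool) (ch : Char) : List Char × List Char × Bool :=
  if st.2.2 then (st.1, st.2.1 ++ [ch], st.2.2)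
  else if ch == ' ' || ch == '\t' then (st.1 ++ [ch], st.2.1, st.2.2)
  else (st.1, st.2.1 ++ [ch], true)

def ws_sep (string : String) : String × String :=
  let r := string.toList.foldl wsSepStep ([], [], false)
  (String.ofList r.1, String.ofList r.2.1)

-- ===== PORT B =====
-- lstrip(' \t') ported by hand as dropWhile over the chars (exact: it removes the leading run of the given chars)
def ws_sep_alt (string : String) : String × String :=
  let rest := (string.toList.dropWhile (fun c => c == ' ' || c == '\t'))
  (String.ofList (string.toList.take (string.toList.length - rest.length)), String.ofList rest)

-- ===== PRECONDITION & SPEC =====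
def Spec_ws_sep (string : String) (out : String × String) : Prop := out = ws_sep_alt string
instance (string : String) (out : String × String) : Decidable (Spec_ws_sep string out) := by unfold Spec_ws_sep; infer_instance

-- ===== CLAIM (what is proved, stated in full; the proofs are below) =====
def Claim_equal_ws_sep : Prop := ∀ (string : String), Dom_ws_sep string → Spec_ws_sep string (ws_sep string)

-- ===== LEMMAS AND PROOFS =====
theorem wsSep_foldl_done (l : List Char) (a b : List Char) :
    l.foldl wsSepStep (a, b, true) = (a, b ++ l, true) := by
  induction l generalizing b with
  | nil => simp
  | cons c t ih => simp [wsSepStep, ih]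

theorem wsSep_foldl_active (l : List Char) (a b : List Char) :
    l.foldl wsSepStep (a, b, false)
      = (a ++ l.takeWhile (fun c => c == ' ' || c == '\t'),
         b ++ l.dropWhile (fun c => c == ' ' || c == '\t'),
         decide (l.dropWhile (fun c => c == ' ' || c == '\t') ≠ [])) := by
  induction l generalizing a b with
  | nil => simp
  | cons c t ih =>
    by_cases h : (c == ' ' || c == '\t') = true
    · simp [wsSepStep, h, ih]
    · simp [wsSepStep, h, wsSep_foldl_done]

-- ===== VERDICT (by name: the statement is the Claim_ definition above) =====
theorem ws_sep_spec : Claim_equal_ws_sep := by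
  intro s _
  unfold Spec_ws_sep ws_sep ws_sep_alt
  have h := wsSep_foldl_active s.toList [] []
  simp only [List.nil_append] at h
  rw [h]
  have hlen : (s.toList.takeWhile (fun c => c == ' ' || c == '\t')).length
      = s.toList.length - (s.toList.dropWhile (fun c => c == ' ' || c == '\t')).length := by
    have hl := congrArg List.length
      (List.takeWhile_append_dropWhile (p := fun c => c == ' ' || c == '\t') (l := s.toList))
    rw [List.length_append] at hl
    omega
  have htake := List.take_left (l₁ := s.toList.takeWhile (fun c => c == ' ' || c == '\t'))
    (l₂ := s.toList.dropWhile (fun c => c == ' ' || c == '\t'))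
  rw [List.takeWhile_append_dropWhile] at htake
  show (String.ofList _, String.ofList _) = (String.ofList _, String.ofList _)
  rw [← hlen, htake]
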